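-- pv_equiv track=rewrite | github.com/SamDeiter/context-monitor | migrate_dialogs_step2.py | replace_method_body
-- ===== SOURCE A (Python) =====
-- def replace_method_body(content, method_name, new_body):
--     """Replace a method's body with a thin wrapper, preserving indentation."""
--     lines = content.split('\n')
--     result = []
--     in_target_method = False
--     method_indent = 0
--     skip_lines = False
--
--     i = 0
--     while i < len(lines):
--         line = lines[i]
--
--         # Check if this is the start of our target method
--         if f'def {method_name}(self)' in line and not in_target_method:
--             in_target_method = True
--             method_indent = len(line) - len(line.lstrip())
--             # Add the new wrapper
--             result.append(f'{" " * method_indent}def {method_name}(self):')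
--             result.append(f'{" " * method_indent}    """Delegated to dialogs module (Phase 4: V2.47)"""')
--             result.append(f'{" " * method_indent}    {new_body}')
--             skip_lines = True
--             i += 1
--             continue
--
--         if skip_lines:
--             # Check if we've hit the next method or class at same/higher level
--             stripped = line.strip()
--             if stripped and not stripped.startswith('#') and not stripped.startswith('"""') and not stripped.startswith("'''"):
--                 current_indent = len(line) - len(line.lstrip())
--                 if current_indent <= method_indent and (stripped.startswith('def ') or stripped.startswith('class ')):
--                     skip_lines = False
--                     in_target_method = False
--                     result.append(line)
--             i += 1
--             continue
--
--         result.append(line)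
--         i += 1
--
--     return '\n'.join(result)
-- ===== SOURCE B (Python) =====
-- def replace_method_body(content, method_name, new_body):
--     """Replace a method's body with a thin wrapper, preserving indentation.
--
--     Two staged passes: (1) collect replacement regions, (2) splice slices of
--     the original lines with the wrapper blocks."""
--     lines = content.split('\n')
--     needle = f'def {method_name}(self)'
--     n = len(lines)
--
--     def is_boundary(line, indent):
--         s = line.strip()
--         return (bool(s) and not s.startswith(('#', '"""', "'''"))
--                 and (len(line) - len(line.lstrip())) <= indent
--                 and (s.startswith('def ') or s.startswith('class ')))
--
--     # phase 1: regions (start, end, indent): lines[start:end] get replaced by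
--     # the 3 wrapper lines; lines[end] (the boundary, if any) is kept and is
--     # never re-tested as a trigger.
--     regions = []
--     i = 0
--     while i < n:
--         if needle in lines[i]:
--             ind = len(lines[i]) - len(lines[i].lstrip())
--             j = i + 1
--             while j < n and not is_boundary(lines[j], ind):
--                 j += 1
--             regions.append((i, j, ind))
--             i = j + 1
--         else:
--             i += 1
--
--     # phase 2: splice
--     out = []
--     prev = 0
--     for s, e, ind in regions:
--         out.extend(lines[prev:s])
--         pad = ' ' * ind
--         out.append(f'{pad}def {method_name}(self):')
--         out.append(f'{pad}    """Delegated to dialogs module (Phase 4: V2.47)"""')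
--         out.append(f'{pad}    {new_body}')
--         prev = e
--     out.extend(lines[prev:])
--     return '\n'.join(out)
-- ===== Notes on version B (the rewrite author's own statement) =====
-- stated objective: alternative
-- what changed: Replaces A's single flag-driven pass (in_target_method/skip_lines state interleaving matching and output) with two staged passes: pass 1 collects (start, end, indent) replacement regions by index, pass 2 builds the output by splicing slices of the original lines with the wrapper blocks.
import Mathlib
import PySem

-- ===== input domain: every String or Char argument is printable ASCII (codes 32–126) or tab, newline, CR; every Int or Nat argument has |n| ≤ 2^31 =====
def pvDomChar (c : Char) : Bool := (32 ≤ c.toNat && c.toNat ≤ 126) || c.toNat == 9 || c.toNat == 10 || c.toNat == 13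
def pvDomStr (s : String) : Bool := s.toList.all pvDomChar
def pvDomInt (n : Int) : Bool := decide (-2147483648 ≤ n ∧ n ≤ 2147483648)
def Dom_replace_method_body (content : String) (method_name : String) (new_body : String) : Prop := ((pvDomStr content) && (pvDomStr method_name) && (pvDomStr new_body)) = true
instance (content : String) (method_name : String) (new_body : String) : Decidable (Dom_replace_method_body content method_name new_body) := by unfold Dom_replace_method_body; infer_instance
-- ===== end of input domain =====

-- B replaces A's one-pass flag-driven scan by two staged passes: first collect
-- the (start, end, indent) replacement regions, then splice slices of the
-- original lines with the wrapper blocks. Objective: alternative decomposition.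

-- ===== PORT A =====
-- shared low-level pieces both Pythons literally compute:
-- 'def {m}(self)'
def pvNeedle (m : String) : String := "def " ++ m ++ "(self)"
-- len(line) - len(line.lstrip()); lstrip removes a prefix so the Nat subtraction is exact
def pvIndent (l : String) : Nat := l.toList.length - (PySem.Chars.lstrip l.toList).length
-- ' ' * n
def pvSpaces (n : Nat) : String := String.ofList (List.replicate n ' ')
-- the three wrapper lines A and B both emit
def pvWrapper (mi : Nat) (m body : String) : List String :=
  [ pvSpaces mi ++ "def " ++ m ++ "(self):"
  , pvSpaces mi ++ "    \"\"\"Delegated to dialogs module (Phase 4: V2.47)\"\"\""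
  , pvSpaces mi ++ "    " ++ body ]

-- A's while-loop: state (in_target_method, method_indent, skip_lines), result built in front
def loopA (m body : String) : List String → Bool → Nat → Bool → List String
  | [], _, _, _ => []
  | l :: ls, inT, mi, skip =>
    if PySem.Str.isIn (pvNeedle m) l && !inT then
      let mi' := pvIndent l
      pvWrapper mi' m body ++ loopA m body ls true mi' true
    else if skip then
      let st := PySem.Str.strip l
      if st ≠ "" && !PySem.Str.startswith st "#" && !PySem.Str.startswith st "\"\"\"" && !PySem.Str.startswith st "'''" then
        let ci := pvIndent l
        if decide (ci ≤ mi) && (PySem.Str.startswith st "def " || PySem.Str.startswith st "class ") then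
          l :: loopA m body ls false mi false
        else
          loopA m body ls inT mi skip
      else
        loopA m body ls inT mi skip
    else
      l :: loopA m body ls inT mi skip

def replace_method_body (content : String) (method_name : String) (new_body : String) : String :=
  -- sep '\n' is nonempty, so split? is always some; getD is never taken
  PySem.Str.join "\n" (loopA method_name new_body ((PySem.Str.split? content "\n").getD []) false 0 false)

-- ===== PORT B =====
-- B's is_boundary(line, indent)
def pvIsBoundary (l : String) (mi : Nat) : Bool :=
  let s := PySem.Str.strip l
  s ≠ "" && !(PySem.Str.startswith s "#" || PySem.Str.startswith s "\"\"\"" || PySem.Str.startswith s "'''")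
    && decide (pvIndent l ≤ mi)
    && (PySem.Str.startswith s "def " || PySem.Str.startswith s "class ")

-- B's inner 'while j < n and not is_boundary(lines[j], ind): j += 1',
-- as the count of leading non-boundary lines of the suffix (= j - (i+1))
def pvFindBoundary (mi : Nat) : List String → Nat
  | [] => 0
  | l :: ls => if pvIsBoundary l mi then 0 else 1 + pvFindBoundary mi ls

-- B's phase 1: the outer index loop, carrying the absolute index i alongside
-- the not-yet-scanned suffix of lines
def pvRegions (m : String) : List String → Nat → List (Nat × Nat × Nat)
  | [], _ => []
  | l :: ls, i =>
    if PySem.Str.isIn (pvNeedle m) l then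
      let ind := pvIndent l
      let k := pvFindBoundary ind ls
      (i, i + 1 + k, ind) :: pvRegions m (ls.drop (k + 1)) (i + k + 2)
    else
      pvRegions m ls (i + 1)
termination_by ls _ => ls.length
decreasing_by
  all_goals simp

-- B's phase 2: splice; the slice lines[prev:s] (0 ≤ prev ≤ s here) is exactly
-- (lines.drop prev).take (s - prev), and the trailing lines[prev:] is lines.drop prev
def pvSplice (m body : String) (lines : List String) : List (Nat × Nat × Nat) → Nat → List String
  | [], prev => lines.drop prev
  | (s, e, ind) :: rs, prev =>
    (lines.drop prev).take (s - prev) ++ pvWrapper ind m body ++ pvSplice m body lines rs e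

def replace_method_body_alt (content : String) (method_name : String) (new_body : String) : String :=
  let lines := (PySem.Str.split? content "\n").getD []
  PySem.Str.join "\n" (pvSplice method_name new_body lines (pvRegions method_name lines 0) 0)

-- ===== PRECONDITION & SPEC =====
def Spec_replace_method_body (content : String) (method_name : String) (new_body : String) (out : String) : Prop := out = replace_method_body_alt content method_name new_body
instance (content : String) (method_name : String) (new_body : String) (out : String) : Decidable (Spec_replace_method_body content method_name new_body out) := by unfold Spec_replace_method_body; infer_instance

-- ===== CLAIM =====
def Claim_equal_replace_method_body : Prop := ∀ (content : String) (method_name : String) (new_body : String), Dom_replace_method_body content method_name new_body → Spec_replace_method_body content method_name new_body (replace_method_body content method_name new_body)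

-- ===== LEMMAS AND PROOFS =====

-- if lines.drop i begins with l, dropping one more yields the tail
theorem pvDropCons {α : Type} (lines : List α) (i : Nat) (l : α) (ls : List α)
    (h : lines.drop i = l :: ls) : lines.drop (i + 1) = ls := by
  rw [← List.drop_drop, h]; rfl

-- every region start produced from absolute index i is ≥ i
theorem pvRegions_start_ge (m : String) (ls : List String) (i : Nat) :
    ∀ r ∈ pvRegions m ls i, i ≤ r.1 := by
  match ls with
  | [] => simp [pvRegions]
  | l :: ls =>
    intro r hr
    rw [pvRegions] at hr
    by_cases ht : PySem.Str.isIn (pvNeedle m) l = true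
    · simp only [ht, if_true] at hr
      rcases List.mem_cons.mp hr with rfl | hr
      · exact le_refl _
      · exact le_trans (by omega) (pvRegions_start_ge m _ _ r hr)
    · rw [Bool.not_eq_true] at ht
      simp only [ht, Bool.false_eq_true, if_false] at hr
      exact le_trans (by omega) (pvRegions_start_ge m ls (i + 1) r hr)
termination_by ls.length
decreasing_by
  all_goals simp

-- splicing with every region start strictly beyond prev peels off one line
theorem pvSplice_cons (m body : String) (lines : List String) (rs : List (Nat × Nat × Nat))
    (prev : Nat) (l : String) (ls : List String)
    (hdrop : lines.drop prev = l :: ls)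
    (hge : ∀ r ∈ rs, prev + 1 ≤ r.1) :
    pvSplice m body lines rs prev = l :: pvSplice m body lines rs (prev + 1) := by
  have hdrop1 : lines.drop (prev + 1) = ls := pvDropCons lines prev l ls hdrop
  cases rs with
  | nil => simp [pvSplice, hdrop, hdrop1]
  | cons r rs =>
    obtain ⟨s, e, ind⟩ := r
    have hs : prev + 1 ≤ s := hge (s, e, ind) (List.mem_cons_self ..)
    simp only [pvSplice, hdrop, hdrop1]
    have h2 : s - prev = (s - (prev + 1)) + 1 := by omega
    simp [h2]

-- characterisation of pvFindBoundary: either no boundary exists (it walks off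
-- the end), or it points at the first boundary line
theorem pvFindBoundary_spec (mi : Nat) (ls : List String) :
    ls.drop (pvFindBoundary mi ls) = [] ∨
    ∃ l' ls', ls.drop (pvFindBoundary mi ls) = l' :: ls' ∧ pvIsBoundary l' mi = true ∧
      ls' = ls.drop (pvFindBoundary mi ls + 1) := by
  induction ls with
  | nil => left; simp [pvFindBoundary]
  | cons l ls ih =>
    by_cases h : pvIsBoundary l mi = true
    · right; exact ⟨l, ls, by simp [pvFindBoundary, h], h, by simp [pvFindBoundary, h]⟩
    · rcases ih with h1 | ⟨l', ls', h1, h2, h3⟩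
      · left; simp [pvFindBoundary, h, Nat.add_comm, h1]
      · right
        refine ⟨l', ls', ?_, h2, ?_⟩
        · simpa [pvFindBoundary, h, Nat.add_comm 1 (pvFindBoundary mi ls)] using h1
        · simpa [pvFindBoundary, h, Nat.add_comm 1 (pvFindBoundary mi ls)] using h3

-- A's skip-state loop step, rewritten through pvIsBoundary (the boolean
-- condition trees compute the same test); the trigger never fires since inT
theorem loopA_skip_step (m body : String) (l : String) (ls : List String) (mi : Nat) :
    loopA m body (l :: ls) true mi true =
      if pvIsBoundary l mi then l :: loopA m body ls false mi false
      else loopA m body ls true mi true := by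
  rw [loopA]
  simp only [pvIsBoundary, Bool.and_false, Bool.not_true]
  split_ifs <;> simp_all

-- A's skip loop jumps straight to the line pvFindBoundary points at
theorem loopA_skip_eq (m body : String) (mi : Nat) (ls : List String) :
    loopA m body ls true mi true =
      match ls.drop (pvFindBoundary mi ls) with
      | [] => []
      | l' :: ls' => l' :: loopA m body ls' false mi false := by
  induction ls with
  | nil => simp [loopA, pvFindBoundary]
  | cons l ls ih =>
    rw [loopA_skip_step]
    by_cases h : pvIsBoundary l mi = true
    · simp [pvFindBoundary, h]
    · simp only [h, Bool.false_eq_true, if_false, ih]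
      simp [pvFindBoundary, h, Nat.add_comm 1 (pvFindBoundary mi ls)]

-- scan-state loopA does not depend on the carried method_indent
theorem loopA_scan_mi (m body : String) (ls : List String) (mi mi' : Nat) :
    loopA m body ls false mi false = loopA m body ls false mi' false := by
  induction ls with
  | nil => rfl
  | cons l ls ih =>
    rw [loopA, loopA]
    by_cases ht : (PySem.Str.isIn (pvNeedle m) l && !false) = true <;> simp [ih]

-- the main invariant: B's two staged passes compute A's one-pass scan
theorem main_inv (m body : String) (lines : List String) (ls : List String) (i mi : Nat)
    (h : lines.drop i = ls) :
    pvSplice m body lines (pvRegions m ls i) i = loopA m body ls false mi false := by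
  match ls with
  | [] => simp [pvRegions, pvSplice, h, loopA]
  | l :: ls =>
    have hdrop1 : lines.drop (i + 1) = ls := pvDropCons lines i l ls h
    by_cases ht : PySem.Str.isIn (pvNeedle m) l = true
    · rw [pvRegions]
      simp only [ht, if_true]
      rw [loopA]
      simp only [ht, Bool.not_false, Bool.and_true, if_true]
      rw [pvSplice]
      simp only [Nat.sub_self, List.take_zero, List.nil_append]
      congr 1
      set ind := pvIndent l with hind
      set k := pvFindBoundary ind ls with hk
      have hdropk : lines.drop (i + 1 + k) = ls.drop k := by
        rw [← List.drop_drop, hdrop1]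
      rw [loopA_skip_eq]
      rcases pvFindBoundary_spec ind ls with hb | ⟨l', ls', hb, _, hls'⟩
      · rw [← hk] at hb
        have h0 : ls.drop (k + 1) = [] := by
          rw [← List.drop_drop, hb]; rfl
        rw [h0, hb]
        simp [pvRegions, pvSplice, hdropk, hb]
      · rw [← hk] at hb hls'
        rw [hb, hls']
        have hdropk2 : lines.drop (i + 1 + k) = l' :: ls.drop (k + 1) := by
          rw [hdropk, hb, hls']
        rw [pvSplice_cons m body lines _ _ l' (ls.drop (k + 1)) hdropk2
          (by intro r hr; exact le_trans (by omega) (pvRegions_start_ge m _ _ r hr))]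
        congr 1
        have he : i + 1 + k + 1 = i + k + 2 := by omega
        rw [he]
        have hd2 : lines.drop (i + k + 2) = ls.drop (k + 1) := by
          have : i + k + 2 = (i + 1) + (k + 1) := by omega
          rw [this, ← List.drop_drop, hdrop1]
        rw [main_inv m body lines (ls.drop (k + 1)) (i + k + 2) mi hd2]
        exact loopA_scan_mi m body _ mi ind
    · rw [Bool.not_eq_true] at ht
      rw [pvRegions]
      simp only [ht, Bool.false_eq_true, if_false]
      rw [loopA]
      simp only [ht, Bool.false_and, Bool.false_eq_true, if_false]
      rw [pvSplice_cons m body lines _ _ l ls h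
        (fun r hr => pvRegions_start_ge m ls (i + 1) r hr)]
      rw [main_inv m body lines ls (i + 1) mi hdrop1]
termination_by ls.length
decreasing_by
  all_goals simp

-- ===== VERDICT =====
theorem replace_method_body_spec : Claim_equal_replace_method_body := by
  intro content m body _
  unfold Spec_replace_method_body replace_method_body replace_method_body_alt
  exact (congrArg (PySem.Str.join "\n") (main_inv m body _ _ 0 0 rfl)).symm
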